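-- pv_equiv track=rewrite | github.com/Hyeong-Seon/road-judge-ai | backend/vlm_code.py | _contra_bits
-- ===== SOURCE A (Python) =====
-- def _contra_bits(axes):
--     """
--     place=1, feature=2, maneuver=4, role=8
--     """
--     if not isinstance(axes, list):
--         axes = []
--     bits = 0
--     for a in axes:
--         t = str(a).strip().lower()
--         if t == "place":
--             bits |= 1
--         elif t == "feature":
--             bits |= 2
--         elif t == "maneuver":
--             bits |= 4
--         elif t == "role":
--             bits |= 8
--     return bits
-- ===== SOURCE B (Python) =====
-- _AXIS_BITS = (("place", 1), ("feature", 2), ("maneuver", 4), ("role", 8))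
--
--
-- def _contra_bits(axes):
--     """
--     place=1, feature=2, maneuver=4, role=8
--     """
--     if not isinstance(axes, list):
--         axes = []
--     seen = {str(a).strip().lower() for a in axes}
--     bits = 0
--     for name, bit in _AXIS_BITS:
--         if name in seen:
--             bits |= bit
--     return bits
-- ===== Notes on version B (the rewrite author's own statement) =====
-- stated objective: idiomatic
-- what changed: B builds a set of normalized axis names once and then ORs bits by iterating a fixed (name, bit) table with membership tests, instead of A's per-element if/elif chain over the input.
import Mathlib
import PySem

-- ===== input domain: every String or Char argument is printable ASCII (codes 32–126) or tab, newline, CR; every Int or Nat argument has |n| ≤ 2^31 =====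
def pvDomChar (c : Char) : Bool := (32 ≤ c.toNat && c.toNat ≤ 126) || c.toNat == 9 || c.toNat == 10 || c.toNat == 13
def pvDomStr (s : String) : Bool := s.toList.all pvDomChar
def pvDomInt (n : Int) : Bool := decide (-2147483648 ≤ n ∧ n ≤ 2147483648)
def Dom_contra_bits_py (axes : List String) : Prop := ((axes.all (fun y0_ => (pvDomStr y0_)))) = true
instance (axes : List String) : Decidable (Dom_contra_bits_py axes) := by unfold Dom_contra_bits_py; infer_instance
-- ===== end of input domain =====

-- B builds a set of normalized axis names once and ORs bits from a fixed (name, bit) table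
-- via membership tests, instead of A's per-element if/elif chain (objective: idiomatic).

-- ===== PORT A =====
def contra_bits_py (axes : List String) : Int :=
  axes.foldl (fun bits a =>
    let t := PySem.Str.lower (PySem.Str.strip a)
    if t = "place" then PySem.Int.bor bits 1
    else if t = "feature" then PySem.Int.bor bits 2
    else if t = "maneuver" then PySem.Int.bor bits 4
    else if t = "role" then PySem.Int.bor bits 8
    else bits) 0

-- ===== PORT B =====
def contra_bits_py_alt (axes : List String) : Int :=
  let seen : PySem.Set String :=
    PySem.Set.ofList (axes.map (fun a => PySem.Str.lower (PySem.Str.strip a)))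
  [("place", (1 : Int)), ("feature", 2), ("maneuver", 4), ("role", 8)].foldl
    (fun bits nb => if PySem.Set.contains seen nb.1 then PySem.Int.bor bits nb.2 else bits) 0

-- ===== PRECONDITION & SPEC =====
def Spec_contra_bits_py (axes : List String) (out : Int) : Prop := out = contra_bits_py_alt axes
instance (axes : List String) (out : Int) : Decidable (Spec_contra_bits_py axes out) := by unfold Spec_contra_bits_py; infer_instance

-- ===== CLAIM (what is proved, stated in full; the proofs are below) =====
def Claim_equal_contra_bits_py : Prop := ∀ (axes : List String), Dom_contra_bits_py axes → Spec_contra_bits_py axes (contra_bits_py axes)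

-- ===== LEMMAS AND PROOFS =====

/-- normalization shared by both programs: str(a).strip().lower() -/
def pvNorm (a : String) : String := PySem.Str.lower (PySem.Str.strip a)

/-- A's loop body, on Nat bits. -/
def pvStepN (n : Nat) (a : String) : Nat :=
  if pvNorm a = "place" then n ||| 1
  else if pvNorm a = "feature" then n ||| 2
  else if pvNorm a = "maneuver" then n ||| 4
  else if pvNorm a = "role" then n ||| 8
  else n

/-- B's result, on Nat, as an OR of membership indicators. -/
def pvEN (axes : List String) : Nat :=
  (((if "place" ∈ axes.map pvNorm then (1 : Nat) else 0) |||
    (if "feature" ∈ axes.map pvNorm then 2 else 0)) |||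
    (if "maneuver" ∈ axes.map pvNorm then 4 else 0)) |||
    (if "role" ∈ axes.map pvNorm then 8 else 0)

lemma pvStep_cast (n : Nat) (a : String) :
    (let t := PySem.Str.lower (PySem.Str.strip a)
     if t = "place" then PySem.Int.bor (↑n : Int) 1
     else if t = "feature" then PySem.Int.bor (↑n : Int) 2
     else if t = "maneuver" then PySem.Int.bor (↑n : Int) 4
     else if t = "role" then PySem.Int.bor (↑n : Int) 8
     else (↑n : Int)) = ↑(pvStepN n a) := by
  simp only [pvStepN, pvNorm]
  split_ifs
  · exact_mod_cast PySem.Int.bor_natCast n 1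
  · exact_mod_cast PySem.Int.bor_natCast n 2
  · exact_mod_cast PySem.Int.bor_natCast n 4
  · exact_mod_cast PySem.Int.bor_natCast n 8
  · rfl

lemma pvA_cast (axes : List String) : ∀ n : Nat,
    axes.foldl (fun bits a =>
      let t := PySem.Str.lower (PySem.Str.strip a)
      if t = "place" then PySem.Int.bor bits 1
      else if t = "feature" then PySem.Int.bor bits 2
      else if t = "maneuver" then PySem.Int.bor bits 4
      else if t = "role" then PySem.Int.bor bits 8
      else bits) (↑n : Int)
    = ↑(axes.foldl pvStepN n) := by
  induction axes with
  | nil => intro n; simp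
  | cons a as ih =>
    intro n
    simp only [List.foldl_cons, pvStep_cast]
    exact ih _

lemma pvB_eq (axes : List String) : contra_bits_py_alt axes = ↑(pvEN axes) := by
  simp only [contra_bits_py_alt, List.foldl_cons, List.foldl_nil, pvEN, pvNorm,
    PySem.Set.contains_eq_listContains, List.contains_iff_mem, PySem.Set.mem_ofList,
    List.mem_map]
  split_ifs <;> rfl

set_option maxHeartbeats 1000000 in
lemma pvMain (axes : List String) : ∀ n : Nat,
    axes.foldl pvStepN n = n ||| pvEN axes := by
  induction axes with
  | nil => intro n; simp [pvEN]
  | cons a as ih =>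
    intro n
    simp only [List.foldl_cons, ih]
    by_cases h1 : pvNorm a = "place"
    · simp [pvStepN, pvEN, h1]
      split_ifs <;> first | rfl | (simp only [Nat.lor_assoc]; congr 1)
    · by_cases h2 : pvNorm a = "feature"
      · simp [pvStepN, pvEN, h2]
        split_ifs <;> first | rfl | (simp only [Nat.lor_assoc]; congr 1)
      · by_cases h3 : pvNorm a = "maneuver"
        · simp [pvStepN, pvEN, h3]
          split_ifs <;> first | rfl | (simp only [Nat.lor_assoc]; congr 1)
        · by_cases h4 : pvNorm a = "role"
          · simp [pvStepN, pvEN, h4]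
            split_ifs <;> first | rfl | (simp only [Nat.lor_assoc]; congr 1)
          · have g1 : ¬("place" = pvNorm a) := fun e => h1 e.symm
            have g2 : ¬("feature" = pvNorm a) := fun e => h2 e.symm
            have g3 : ¬("maneuver" = pvNorm a) := fun e => h3 e.symm
            have g4 : ¬("role" = pvNorm a) := fun e => h4 e.symm
            simp [pvStepN, pvEN, h1, h2, h3, h4, g1, g2, g3, g4]

-- ===== VERDICT (by name: the statement is the Claim_ definition above) =====
theorem contra_bits_py_spec : Claim_equal_contra_bits_py := by
  intro axes _
  unfold Spec_contra_bits_py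
  rw [pvB_eq]
  show contra_bits_py axes = _
  unfold contra_bits_py
  rw [show (0 : Int) = ((0 : Nat) : Int) from rfl, pvA_cast, pvMain]
  simp
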